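-- pv_equiv track=rewrite | github.com/adityasingh108/Data-structure-and-Algorithms-Python | Dynamic programming/numberFactor.py | numberFactorTD
-- ===== SOURCE A (Python) =====
-- def numberFactorTD(n, tempDict):
--     if n in (0, 1, 2):
--         return 1
--     if n == 3:
--         return 2
--     else:
--         if n not in tempDict:
--             sub1 = numberFactorTD(n-1, tempDict)
--             sub2 = numberFactorTD(n-3, tempDict)
--             sub3 = numberFactorTD(n-4, tempDict)
--             tempDict[n] = sub1 + sub2 + sub3
--         return tempDict[n]
-- ===== SOURCE B (Python) =====
-- # Explicit-stack iterative evaluation of the memoized recurrence instead of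
-- # recursion (no interpreter depth limit); fills tempDict in place as the memo.
-- def _val(k, tempDict):
--     if k in (0, 1, 2):
--         return 1
--     if k == 3:
--         return 2
--     return tempDict[k]
--
-- def numberFactorTD(n, tempDict):
--     stack = [n]
--     while stack:
--         k = stack[-1]
--         if k in (0, 1, 2, 3) or k in tempDict:
--             stack.pop()
--             continue
--         pending = [j for j in (k - 1, k - 3, k - 4)
--                    if j not in (0, 1, 2, 3) and j not in tempDict]
--         if pending:
--             stack.extend(pending)
--         else:
--             stack.pop()
--             tempDict[k] = _val(k - 1, tempDict) + _val(k - 3, tempDict) + _val(k - 4, tempDict)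
--     return _val(n, tempDict)
-- ===== Notes on version B (the rewrite author's own statement) =====
-- stated objective: alternative
-- what changed: Replaces the top-down memoized recursion with an explicit work-stack loop that fills the same memo dict iteratively, so no recursion and no interpreter depth limit; Pre_ excludes inputs where A raises (negative n absent from tempDict, and large absent n hitting Python's recursion limit, with a safe bound 900 that also excludes a sliver 900<n<~1000 where A still returns and B agrees); return-value equivalence only, both mutate tempDict in place.
import Mathlib
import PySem

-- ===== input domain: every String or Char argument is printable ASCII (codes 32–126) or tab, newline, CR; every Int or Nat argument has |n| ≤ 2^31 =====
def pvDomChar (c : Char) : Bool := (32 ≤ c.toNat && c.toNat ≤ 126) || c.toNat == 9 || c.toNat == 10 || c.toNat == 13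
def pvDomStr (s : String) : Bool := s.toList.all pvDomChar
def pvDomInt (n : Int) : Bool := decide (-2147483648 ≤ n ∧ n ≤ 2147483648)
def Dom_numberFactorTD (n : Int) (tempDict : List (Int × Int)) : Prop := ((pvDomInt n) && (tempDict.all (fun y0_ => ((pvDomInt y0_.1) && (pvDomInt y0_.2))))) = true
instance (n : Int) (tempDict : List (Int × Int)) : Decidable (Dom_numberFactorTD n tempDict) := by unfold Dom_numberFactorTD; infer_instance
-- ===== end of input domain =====

-- B replaces A's top-down memoized recursion by an explicit work-stack loop over the
-- same memo dict (return-value equivalence only: both Pythons mutate tempDict in place).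


-- ===== PORT A =====
-- A's recursion is on n (decreasing by 1/3/4 only when n ∉ dict and n ∉ {0,1,2,3});
-- fuel = n.toNat bounds the depth; the fuel-0 branch is unreachable under Pre_.
def goA (fuel : Nat) (n : Int) (d : PySem.Dict Int Int) : Int × PySem.Dict Int Int :=
  if n = 0 ∨ n = 1 ∨ n = 2 then (1, d)
  else if n = 3 then (2, d)
  else
    match PySem.Dict.get? d n with
    | some v => (v, d)                 -- 'n in tempDict': return tempDict[n]
    | none =>
      match fuel with
      | 0 => (0, d)                    -- unreachable inside Pre_ (Python recurses further)
      | Nat.succ fuel' =>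
        let r1 := goA fuel' (n - 1) d
        let r2 := goA fuel' (n - 3) r1.2
        let r3 := goA fuel' (n - 4) r2.2
        let d4 := PySem.Dict.insert r3.2 n (r1.1 + r2.1 + r3.1)
        (PySem.Dict.getD d4 n 0, d4)   -- 'return tempDict[n]' after the insert

def numberFactorTD (n : Int) (tempDict : List (Int × Int)) : Int :=
  (goA n.toNat n (PySem.Dict.mk tempDict)).1

-- ===== PORT B =====
-- _val(k, tempDict); tempDict[k] is exact when the key is present (KeyError is outside Pre_)
def valB (tempDict : PySem.Dict Int Int) (k : Int) : Int :=
  if k = 0 ∨ k = 1 ∨ k = 2 then 1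
  else if k = 3 then 2
  else PySem.Dict.getD tempDict k 0

-- the while-loop over the work stack (top of stack = head of the list, so Python's
-- stack.extend(pending) becomes 'pending.reverse ++ stack'); fuel only makes the
-- loop total in Lean — inside Pre_ it never runs out (proved below)
def goB : Nat → List Int → PySem.Dict Int Int → PySem.Dict Int Int
  | _, [], d => d
  | 0, _ :: _, d => d
  | fuel + 1, k :: s, d =>
    if (k = 0 ∨ k = 1 ∨ k = 2 ∨ k = 3) ∨ (PySem.Dict.get? d k).isSome = true then
      goB fuel s d
    else
      let pending := List.filter
        (fun j => !(decide (j = 0 ∨ j = 1 ∨ j = 2 ∨ j = 3)) && !(PySem.Dict.get? d j).isSome)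
        [k - 1, k - 3, k - 4]
      if pending.isEmpty then
        goB fuel s (PySem.Dict.insert d k (valB d (k - 1) + valB d (k - 3) + valB d (k - 4)))
      else
        goB fuel (pending.reverse ++ k :: s) d

def numberFactorTD_alt (n : Int) (tempDict : List (Int × Int)) : Int :=
  valB (goB
    (if (n = 0 ∨ n = 1 ∨ n = 2 ∨ n = 3) ∨ (PySem.Dict.get? (PySem.Dict.mk tempDict) n).isSome = true
     then 1 else 4 ^ (n.toNat + 1))
    [n] (PySem.Dict.mk tempDict)) n

-- ===== PRECONDITION & SPEC =====
-- Pre_ excludes inputs where A raises: negative n absent from tempDict (unbounded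
-- descent, RecursionError; B's loop does not terminate there either), and n > 900
-- absent from tempDict, where A's recursion depth ≈ n can exceed Python's recursion
-- limit (RecursionError between 1000 and 1050 here); the exact threshold is
-- interpreter-dependent, so a safe bound 900 is used — it also excludes some inputs
-- (900 < n ≲ 1000, n absent) on which A still returns and B agrees.
def Pre_numberFactorTD (n : Int) (tempDict : List (Int × Int)) : Prop :=
  (0 ≤ n ∧ n ≤ 900) ∨ (PySem.Dict.get? (PySem.Dict.mk tempDict) n).isSome = true
instance (n : Int) (tempDict : List (Int × Int)) : Decidable (Pre_numberFactorTD n tempDict) := by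
  unfold Pre_numberFactorTD; infer_instance

def pvWitness_numberFactorTD : Int × (List (Int × Int)) := (7, [(5, 100)])

def Spec_numberFactorTD (n : Int) (tempDict : List (Int × Int)) (out : Int) : Prop := out = numberFactorTD_alt n tempDict
instance (n : Int) (tempDict : List (Int × Int)) (out : Int) : Decidable (Spec_numberFactorTD n tempDict out) := by unfold Spec_numberFactorTD; infer_instance

-- ===== CLAIM (what is proved, stated in full; the proofs are below) =====
def Claim_equal_numberFactorTD : Prop := ∀ (n : Int) (tempDict : List (Int × Int)), Dom_numberFactorTD n tempDict → Pre_numberFactorTD n tempDict → Spec_numberFactorTD n tempDict (numberFactorTD n tempDict)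

-- ===== LEMMAS AND PROOFS =====

-- The mathematical value both programs compute, relative to the ORIGINAL dict d.
def W (d : PySem.Dict Int Int) : Nat → Int
  | 0 => 1
  | 1 => 1
  | 2 => 1
  | 3 => 2
  | (k + 4) => PySem.Dict.getD d ((k : Int) + 4) (W d (k + 3) + W d (k + 1) + W d k)

-- d extends d₀ only by correct memo entries at keys ≥ 4 absent from d₀.
def MemoExt (d₀ d : PySem.Dict Int Int) : Prop :=
  ∀ k : Int, PySem.Dict.get? d k = PySem.Dict.get? d₀ k ∨
    (4 ≤ k ∧ PySem.Dict.get? d₀ k = none ∧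
      PySem.Dict.get? d k = some (W d₀ k.toNat))

-- k needs no further work: base case or memoized
def resolvedB (d : PySem.Dict Int Int) (k : Int) : Prop :=
  (k = 0 ∨ k = 1 ∨ k = 2 ∨ k = 3) ∨ (PySem.Dict.get? d k).isSome = true

-- d' preserves every entry of d (the loop only inserts at absent keys)
def extD (d d' : PySem.Dict Int Int) : Prop :=
  ∀ j : Int, (PySem.Dict.get? d j).isSome = true → PySem.Dict.get? d' j = PySem.Dict.get? d j

lemma W_of_some (d : PySem.Dict Int Int) (n : Int) (v : Int) (h4 : 4 ≤ n)
    (h : PySem.Dict.get? d n = some v) : W d n.toNat = v := by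
  obtain ⟨k, hk⟩ : ∃ k : Nat, n.toNat = k + 4 := ⟨(n - 4).toNat, by omega⟩
  have hkn : (k : Int) + 4 = n := by omega
  rw [hk]
  simp only [W, hkn, PySem.Dict.getD_eq_get?_getD, h, Option.getD_some]

lemma W_of_none (d : PySem.Dict Int Int) (n : Int) (h4 : 4 ≤ n)
    (h : PySem.Dict.get? d n = none) :
    W d n.toNat = W d (n - 1).toNat + W d (n - 3).toNat + W d (n - 4).toNat := by
  obtain ⟨k, hk⟩ : ∃ k : Nat, n.toNat = k + 4 := ⟨(n - 4).toNat, by omega⟩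
  have hkn : (k : Int) + 4 = n := by omega
  have h1 : (n - 1).toNat = k + 3 := by omega
  have h3 : (n - 3).toNat = k + 1 := by omega
  have h4' : (n - 4).toNat = k := by omega
  rw [hk, h1, h3, h4']
  simp only [W, hkn, PySem.Dict.getD_eq_get?_getD, h, Option.getD_none]

lemma W_small (d : PySem.Dict Int Int) (n : Int) (h0 : 0 ≤ n) (h2 : n ≤ 2) :
    W d n.toNat = 1 := by
  interval_cases n <;> rfl

lemma goA_correct (d₀ : PySem.Dict Int Int) :
    ∀ (fuel : Nat) (n : Int) (d : PySem.Dict Int Int), MemoExt d₀ d → 0 ≤ n →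
      (n ≤ 3 ∨ n - 3 ≤ (fuel : Int)) →
      (goA fuel n d).1 = W d₀ n.toNat ∧ MemoExt d₀ (goA fuel n d).2 := by
  intro fuel
  induction fuel with
  | zero =>
    intro n d hext hn hf
    unfold goA
    by_cases h012 : n = 0 ∨ n = 1 ∨ n = 2
    · rw [if_pos h012]
      exact ⟨(W_small d₀ n hn (by omega)).symm, hext⟩
    rw [if_neg h012]
    by_cases h3 : n = 3
    · rw [if_pos h3]; subst h3; exact ⟨rfl, hext⟩
    rw [if_neg h3]
    have h4 : 4 ≤ n := by omega
    exact absurd hf (by omega)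
  | succ f ih =>
    intro n d hext hn hf
    unfold goA
    by_cases h012 : n = 0 ∨ n = 1 ∨ n = 2
    · rw [if_pos h012]
      exact ⟨(W_small d₀ n hn (by omega)).symm, hext⟩
    rw [if_neg h012]
    by_cases h3 : n = 3
    · rw [if_pos h3]; subst h3; exact ⟨rfl, hext⟩
    rw [if_neg h3]
    have h4 : 4 ≤ n := by omega
    rcases hget : PySem.Dict.get? d n with _ | v
    · -- none: d₀ has no entry either
      have hnone : PySem.Dict.get? d₀ n = none := by
        rcases hext n with he | ⟨_, _, he⟩
        · rw [← he]; exact hget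
        · rw [hget] at he; exact absurd he (by simp)
      obtain ⟨H1v, H1e⟩ := ih (n - 1) d hext (by omega) (by omega)
      obtain ⟨H2v, H2e⟩ := ih (n - 3) (goA f (n - 1) d).2 H1e (by omega) (by omega)
      obtain ⟨H3v, H3e⟩ := ih (n - 4) (goA f (n - 3) (goA f (n - 1) d).2).2 H2e (by omega) (by omega)
      simp only
      have hsum : (goA f (n - 1) d).1 + (goA f (n - 3) (goA f (n - 1) d).2).1 +
          (goA f (n - 4) (goA f (n - 3) (goA f (n - 1) d).2).2).1 = W d₀ n.toNat := by
        rw [H1v, H2v, H3v, W_of_none d₀ n h4 hnone]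
      constructor
      · rw [PySem.Dict.getD_eq_get?_getD, PySem.Dict.get?_insert_self, Option.getD_some, hsum]
      · intro k
        by_cases hk : k = n
        · subst hk
          right
          exact ⟨h4, hnone, by rw [PySem.Dict.get?_insert_self, hsum]⟩
        · rw [PySem.Dict.get?_insert_of_ne _ _ hk]
          exact H3e k
    · -- some: return the stored value
      refine ⟨?_, hext⟩
      rcases hext n with he | ⟨_, hd₀, he⟩
      · rw [hget] at he
        exact (W_of_some d₀ n v h4 he.symm).symm
      · rw [hget] at he
        simpa using he

lemma goB_nil (fuel : Nat) (d : PySem.Dict Int Int) : goB fuel [] d = d := by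
  cases fuel <;> rfl

lemma valB_eq_W (d₀ d : PySem.Dict Int Int) (k : Int) (hmem : MemoExt d₀ d)
    (hres : resolvedB d k) (hk : 0 ≤ k) : valB d k = W d₀ k.toNat := by
  unfold valB
  by_cases h012 : k = 0 ∨ k = 1 ∨ k = 2
  · rw [if_pos h012, W_small d₀ k hk (by omega)]
  rw [if_neg h012]
  by_cases h3 : k = 3
  · rw [if_pos h3]; subst h3; rfl
  rw [if_neg h3]
  have h4 : 4 ≤ k := by
    push Not at h012
    omega
  rcases hres with hb | hs
  · exact absurd hb (by push Not at h012 ⊢; exact ⟨h012.1, h012.2.1, h012.2.2, h3⟩)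
  obtain ⟨v, hv⟩ := Option.isSome_iff_exists.mp hs
  rw [PySem.Dict.getD_eq_get?_getD, hv, Option.getD_some]
  rcases hmem k with he | ⟨_, _, he⟩
  · have h' : PySem.Dict.get? d₀ k = some v := by rw [← he]; exact hv
    exact (W_of_some d₀ k v h4 h').symm
  · rw [hv] at he
    exact Option.some.inj he

-- the loop resolves the top of the stack, given enough fuel (4^(k+1) suffices)
lemma goB_run (d₀ : PySem.Dict Int Int) :
    ∀ (fuel : Nat) (k : Int) (d : PySem.Dict Int Int) (s : List Int),
      MemoExt d₀ d → 0 ≤ k → 4 ^ (k.toNat + 1) ≤ fuel →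
      ∃ d' fuel', goB fuel (k :: s) d = goB fuel' s d' ∧ MemoExt d₀ d' ∧ extD d d' ∧
        resolvedB d' k ∧ fuel ≤ fuel' + 4 ^ (k.toNat + 1) ∧ fuel' ≤ fuel := by
  intro fuel
  induction fuel using Nat.strong_induction_on with
  | _ fuel IH =>
  intro k d s hmem hk hfuel
  have h1pow : 1 ≤ 4 ^ (k.toNat + 1) := Nat.one_le_pow _ _ (by norm_num)
  obtain ⟨f, rfl⟩ : ∃ f, fuel = f + 1 := ⟨fuel - 1, by omega⟩
  by_cases hres : (k = 0 ∨ k = 1 ∨ k = 2 ∨ k = 3) ∨ (PySem.Dict.get? d k).isSome = true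
  · refine ⟨d, f, ?_, hmem, fun j _ => rfl, hres, by omega, by omega⟩
    simp only [goB]
    rw [if_pos hres]
  · have hnb : ¬(k = 0 ∨ k = 1 ∨ k = 2 ∨ k = 3) := (not_or.mp hres).1
    have hk4 : 4 ≤ k := by push Not at hnb; omega
    have hnone : PySem.Dict.get? d k = none := by
      have h2 := (not_or.mp hres).2
      cases h : PySem.Dict.get? d k with
      | none => rfl
      | some v => rw [h] at h2; simp at h2
    have hnone0 : PySem.Dict.get? d₀ k = none := by
      rcases hmem k with he | ⟨_, _, he⟩
      · rw [← he]; exact hnone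
      · rw [hnone] at he; exact absurd he (by simp)
    have hK4 : 4 ≤ k.toNat := by omega
    have hchild : ∀ j ∈ [k - 1, k - 3, k - 4], 0 ≤ j ∧ j.toNat + 1 ≤ k.toNat := by
      intro j hj
      simp only [List.mem_cons, List.not_mem_nil, or_false] at hj
      rcases hj with rfl | rfl | rfl <;> exact ⟨by omega, by omega⟩
    -- resolve a list of children, chaining the outer induction hypothesis
    have runlist : ∀ (l : List Int), (∀ j ∈ l, 0 ≤ j ∧ j.toNat + 1 ≤ k.toNat) →
        ∀ (d : PySem.Dict Int Int) (s : List Int) (fuel : Nat),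
        fuel ≤ f → MemoExt d₀ d → l.length * 4 ^ k.toNat ≤ fuel →
        ∃ d' fuel', goB fuel (l ++ s) d = goB fuel' s d' ∧ MemoExt d₀ d' ∧ extD d d' ∧
          (∀ j ∈ l, resolvedB d' j) ∧ fuel ≤ fuel' + l.length * 4 ^ k.toNat ∧ fuel' ≤ fuel := by
      intro l
      induction l with
      | nil =>
        intro _ d s fuel _ hm _
        exact ⟨d, fuel, rfl, hm, fun j _ => rfl, by simp, by simp, le_refl _⟩
      | cons j l ihl =>
        intro hjs d s fuel hfle hm hlen
        have hj := hjs j (List.mem_cons_self ..)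
        have hpow : 4 ^ (j.toNat + 1) ≤ 4 ^ k.toNat := Nat.pow_le_pow_right (by norm_num) hj.2
        simp only [List.length_cons, Nat.succ_mul] at hlen
        have hfj : 4 ^ (j.toNat + 1) ≤ fuel := by omega
        obtain ⟨d₁, fuel₁, heq1, hm1, hx1, hr1, hf1, hf1'⟩ :=
          IH fuel (by omega) j d (l ++ s) hm hj.1 hfj
        obtain ⟨d₂, fuel₂, heq2, hm2, hx2, hr2, hf2, hf2'⟩ :=
          ihl (fun j' hj' => hjs j' (List.mem_cons_of_mem _ hj')) d₁ s fuel₁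
            (by omega) hm1 (by omega)
        refine ⟨d₂, fuel₂, ?_, hm2, ?_, ?_, by simp only [List.length_cons, Nat.succ_mul]; omega, by omega⟩
        · calc goB fuel ((j :: l) ++ s) d = goB fuel₁ (l ++ s) d₁ := heq1
            _ = goB fuel₂ s d₂ := heq2
        · intro j' h'
          have h1 := hx1 j' h'
          have h1s : (PySem.Dict.get? d₁ j').isSome = true := by rw [h1]; exact h'
          rw [hx2 j' h1s, h1]
        · intro j' hj'
          rcases List.mem_cons.mp hj' with rfl | hmem'
          · rcases hr1 with hb | hs'
            · exact Or.inl hb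
            · exact Or.inr (by rw [hx2 j' hs']; exact hs')
          · exact hr2 j' hmem'
    simp only [goB]
    rw [if_neg hres]
    set pred : Int → Bool :=
      fun j => !(decide (j = 0 ∨ j = 1 ∨ j = 2 ∨ j = 3)) && !(PySem.Dict.get? d j).isSome with hpred
    set pending := List.filter pred [k - 1, k - 3, k - 4] with hpendeq
    have hpred_res : ∀ j, pred j = false → resolvedB d j := by
      intro j hpj
      rw [hpred] at hpj
      simp only [Bool.and_eq_false_iff, Bool.not_eq_false', decide_eq_true_eq] at hpj
      rcases hpj with h | h
      · exact Or.inl h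
      · exact Or.inr h
    by_cases hemp : pending.isEmpty
    · rw [if_pos hemp]
      have hresall : ∀ j ∈ [k - 1, k - 3, k - 4], resolvedB d j := by
        intro j hj
        have hnil : pending = [] := List.isEmpty_iff.mp hemp
        have := List.filter_eq_nil_iff.mp (hpendeq ▸ hnil) j hj
        exact hpred_res j (by revert this; cases pred j <;> simp)
      have hval : valB d (k - 1) + valB d (k - 3) + valB d (k - 4) = W d₀ k.toNat := by
        rw [valB_eq_W d₀ d (k - 1) hmem (hresall _ (by simp)) (by omega),
            valB_eq_W d₀ d (k - 3) hmem (hresall _ (by simp)) (by omega),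
            valB_eq_W d₀ d (k - 4) hmem (hresall _ (by simp)) (by omega),
            W_of_none d₀ k hk4 hnone0]
      refine ⟨PySem.Dict.insert d k (valB d (k - 1) + valB d (k - 3) + valB d (k - 4)), f,
        rfl, ?_, ?_, ?_, by omega, by omega⟩
      · intro j
        by_cases hjk : j = k
        · subst hjk
          exact Or.inr ⟨hk4, hnone0, by rw [PySem.Dict.get?_insert_self, hval]⟩
        · rw [PySem.Dict.get?_insert_of_ne _ _ hjk]
          exact hmem j
      · intro j hjs
        have hjk : j ≠ k := by
          intro e; subst e; rw [hnone] at hjs; simp at hjs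
        rw [PySem.Dict.get?_insert_of_ne _ _ hjk]
      · exact Or.inr (by rw [PySem.Dict.get?_insert_self]; rfl)
    · rw [if_neg hemp]
      have hplen : pending.length ≤ 3 := by
        have h := List.length_filter_le pred [k - 1, k - 3, k - 4]
        simpa using h
      have hpmem : ∀ j ∈ pending.reverse, 0 ≤ j ∧ j.toNat + 1 ≤ k.toNat := by
        intro j hj
        rw [List.mem_reverse] at hj
        exact hchild j (List.mem_of_mem_filter hj)
      have hpow4 : 4 ^ (k.toNat + 1) = 4 * 4 ^ k.toNat := by ring
      have h1P : 1 ≤ 4 ^ k.toNat := Nat.one_le_pow _ _ (by norm_num)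
      have h256 : 256 ≤ 4 ^ k.toNat := by
        calc (256 : Nat) = 4 ^ 4 := by norm_num
          _ ≤ 4 ^ k.toNat := Nat.pow_le_pow_right (by norm_num) hK4
      have hrevlen : pending.reverse.length = pending.length := List.length_reverse
      have hlenmul : pending.reverse.length * 4 ^ k.toNat ≤ 3 * 4 ^ k.toNat :=
        Nat.mul_le_mul_right _ (by omega)
      have hfbig : 4 * 4 ^ k.toNat ≤ f + 1 := by rw [← hpow4]; exact hfuel
      obtain ⟨d₁, fuel₁, heq1, hm1, hx1, hr1, hf1, hf1'⟩ :=
        runlist pending.reverse hpmem d (k :: s) f (le_refl f) hmem (by omega)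
      have hfuel₁pos : 1 ≤ fuel₁ := by omega
      obtain ⟨f₁, rfl⟩ : ∃ f₁, fuel₁ = f₁ + 1 := ⟨fuel₁ - 1, by omega⟩
      by_cases hres1 : (k = 0 ∨ k = 1 ∨ k = 2 ∨ k = 3) ∨ (PySem.Dict.get? d₁ k).isSome = true
      · refine ⟨d₁, f₁, ?_, hm1, hx1, hres1, by omega, by omega⟩
        calc goB f (pending.reverse ++ k :: s) d = goB (f₁ + 1) (k :: s) d₁ := heq1
          _ = goB f₁ s d₁ := by simp only [goB]; rw [if_pos hres1]
      · have hnone1 : PySem.Dict.get? d₁ k = none := by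
          have h2 := (not_or.mp hres1).2
          cases h : PySem.Dict.get? d₁ k with
          | none => rfl
          | some v => rw [h] at h2; simp at h2
        have hresall : ∀ j ∈ [k - 1, k - 3, k - 4], resolvedB d₁ j := by
          intro j hj
          by_cases hjp : j ∈ pending
          · exact hr1 j (List.mem_reverse.mpr hjp)
          · have hpf : pred j = false := by
              cases h : pred j
              · rfl
              · exact absurd (List.mem_filter.mpr ⟨hj, h⟩) (hpendeq ▸ hjp)
            rcases hpred_res j hpf with hb | hs'
            · exact Or.inl hb
            · exact Or.inr (by rw [hx1 j hs']; exact hs')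
        have hfilt1 : List.filter
            (fun j => !(decide (j = 0 ∨ j = 1 ∨ j = 2 ∨ j = 3)) && !(PySem.Dict.get? d₁ j).isSome)
            [k - 1, k - 3, k - 4] = [] := by
          apply List.filter_eq_nil_iff.mpr
          intro j hj
          rcases hresall j hj with hb | hs'
          · simp [hb]
          · simp [hs']
        have hval : valB d₁ (k - 1) + valB d₁ (k - 3) + valB d₁ (k - 4) = W d₀ k.toNat := by
          rw [valB_eq_W d₀ d₁ (k - 1) hm1 (hresall _ (by simp)) (by omega),
              valB_eq_W d₀ d₁ (k - 3) hm1 (hresall _ (by simp)) (by omega),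
              valB_eq_W d₀ d₁ (k - 4) hm1 (hresall _ (by simp)) (by omega),
              W_of_none d₀ k hk4 hnone0]
        refine ⟨PySem.Dict.insert d₁ k (valB d₁ (k - 1) + valB d₁ (k - 3) + valB d₁ (k - 4)), f₁,
          ?_, ?_, ?_, ?_, by omega, by omega⟩
        · calc goB f (pending.reverse ++ k :: s) d = goB (f₁ + 1) (k :: s) d₁ := heq1
            _ = _ := by
              simp only [goB]
              rw [if_neg hres1]
              simp only [hfilt1, List.isEmpty_nil, if_pos]
        · intro j
          by_cases hjk : j = k
          · subst hjk
            exact Or.inr ⟨hk4, hnone0, by rw [PySem.Dict.get?_insert_self, hval]⟩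
          · rw [PySem.Dict.get?_insert_of_ne _ _ hjk]
            exact hm1 j
        · intro j hjs
          have hjk : j ≠ k := by
            intro e; subst e; rw [hnone] at hjs; simp at hjs
          have h1 := hx1 j hjs
          have h1s : (PySem.Dict.get? d₁ j).isSome = true := by rw [h1]; exact hjs
          rw [PySem.Dict.get?_insert_of_ne _ _ hjk, h1]
        · exact Or.inr (by rw [PySem.Dict.get?_insert_self]; rfl)

-- B computes W on absent, non-base n ≥ 0
lemma alt_eq_W (n : Int) (td : List (Int × Int)) (h0 : 0 ≤ n)
    (hnb : ¬(n = 0 ∨ n = 1 ∨ n = 2 ∨ n = 3))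
    (habs : PySem.Dict.get? (PySem.Dict.mk td) n = none) :
    numberFactorTD_alt n td = W (PySem.Dict.mk td) n.toNat := by
  unfold numberFactorTD_alt
  rw [if_neg (by rw [habs]; simpa using hnb)]
  obtain ⟨d', fuel', heq, hm, _, hres, _, _⟩ :=
    goB_run (PySem.Dict.mk td) (4 ^ (n.toNat + 1)) n (PySem.Dict.mk td) []
      (fun k => Or.inl rfl) h0 (le_refl _)
  rw [heq, goB_nil]
  exact valB_eq_W (PySem.Dict.mk td) d' n hm hres h0

-- ===== VERDICT (by name: the statement is the Claim_ definition above) =====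
theorem numberFactorTD_spec : Claim_equal_numberFactorTD := by
  intro n td _hdom hpre
  unfold Spec_numberFactorTD
  by_cases hb : n = 0 ∨ n = 1 ∨ n = 2 ∨ n = 3
  · -- base cases: both sides are the literal base value
    rcases hb with rfl | rfl | rfl | rfl <;> simp [numberFactorTD, numberFactorTD_alt, goA, valB]
  · rcases hv : PySem.Dict.get? (PySem.Dict.mk td) n with _ | v
    · -- absent key: Pre_ forces 0 ≤ n; both sides compute W
      have hn0 : 0 ≤ n := by
        rcases hpre with ⟨h, _⟩ | h
        · exact h
        · rw [hv] at h; simp at h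
      rw [alt_eq_W n td hn0 hb hv]
      exact (goA_correct (PySem.Dict.mk td) n.toNat n (PySem.Dict.mk td)
        (fun k => Or.inl rfl) hn0 (by omega)).1
    · -- present key (n ∉ {0,1,2,3}): both sides return the stored value
      have hs : (PySem.Dict.get? (PySem.Dict.mk td) n).isSome = true := by rw [hv]; rfl
      have hA : numberFactorTD n td = v := by
        unfold numberFactorTD goA
        rw [if_neg (by tauto), if_neg (by tauto), hv]
      have hB : numberFactorTD_alt n td = v := by
        unfold numberFactorTD_alt
        rw [if_pos (Or.inr hs)]
        simp only [goB]
        rw [if_pos (Or.inr hs)]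
        unfold valB
        rw [if_neg (by tauto), if_neg (by tauto), PySem.Dict.getD_eq_get?_getD, hv]
        rfl
      rw [hA, hB]
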